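-- pv_equiv track=rewrite | github.com/Shadybloom/stories-profiler | wordfreq_morph.py | f_tokenizer
-- ===== SOURCE A (Python) =====
-- def f_tokenizer (d_phrases, token_lenght=2):
--     """Разбивает словарь фраз на токены (пары слов)."""
--     stats = {}
--     for phrase in d_phrases:
--         phrase_list = phrase.split(" ")
--         token = [ ]
--         for word in phrase_list:
--             if len(token) < token_lenght:
--                 token.append(word)
--             else:
--                 token.append(word)
--                 token.pop(0)
--                 token_to_stats = ' '.join(token)
--                 stats[token_to_stats] = stats.get(token_to_stats, 0) + 1
--     # Так-то стоило бы суммировать ключи и значения, а не просто заменить ключи.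
--     # Или, лучше, добавить более длинные и более короткие чем токен фразы.
--     #stats.update(d_phrases)
--     return stats
-- ===== SOURCE B (Python) =====
-- def f_tokenizer(d_phrases, token_lenght=2):
--     """Разбивает словарь фраз на токены (пары слов)."""
--     stats = {}
--     for phrase in d_phrases:
--         words = phrase.split(" ")
--         # A skips the first window of each phrase, so counting starts at index 1.
--         for i in range(1, len(words) - token_lenght + 1):
--             key = " ".join(words[i:i + token_lenght])
--             stats[key] = stats.get(key, 0) + 1
--     return stats
-- ===== Notes on version B (the rewrite author's own statement) =====
-- stated objective: simpler
-- what changed: Replaces the rolling token list maintained by append/pop(0) with direct index-based slicing: one range loop per phrase forming each window as words[i:i+token_lenght] (starting at 1, since A never counts a phrase's first window).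
-- outside the precondition, e.g. on f_tokenizer({'a b c': 1}, -1): A returns {'': 3}, B returns {'': 4}
import Mathlib
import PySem

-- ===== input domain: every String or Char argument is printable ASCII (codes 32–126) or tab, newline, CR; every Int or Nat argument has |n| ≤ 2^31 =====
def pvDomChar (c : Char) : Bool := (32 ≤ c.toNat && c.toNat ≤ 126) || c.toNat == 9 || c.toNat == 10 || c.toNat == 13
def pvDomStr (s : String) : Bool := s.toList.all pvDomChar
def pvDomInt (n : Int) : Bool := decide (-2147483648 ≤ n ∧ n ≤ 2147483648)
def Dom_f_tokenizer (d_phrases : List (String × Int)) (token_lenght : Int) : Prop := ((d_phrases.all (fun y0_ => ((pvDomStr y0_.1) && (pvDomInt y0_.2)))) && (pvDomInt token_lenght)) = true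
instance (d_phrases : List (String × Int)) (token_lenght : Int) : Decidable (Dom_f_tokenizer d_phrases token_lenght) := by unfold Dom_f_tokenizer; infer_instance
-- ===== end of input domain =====

-- B replaces A's rolling token list (append/pop(0)) with index-based slicing over each
-- phrase's word list; simpler decomposition, same cost. (A's `for phrase in d_phrases`
-- iterates the dict's keys, ported as dedup of the association list's keys.)

-- ===== PORT A =====
def f_tokenizer (d_phrases : List (String × Int)) (token_lenght : Int) : List (String × Int) :=
  ((PySem.List.dedup (d_phrases.map (·.1))).foldl
    (fun stats phrase =>
      let phrase_list := (PySem.Str.split? phrase " ").getD []  -- sep " " ≠ "": split? is always some here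
      (phrase_list.foldl
        (fun (st : List String × PySem.Dict String Int) word =>
          if (st.1.length : Int) < token_lenght then
            (st.1 ++ [word], st.2)
          else
            -- token.append(word); token.pop(0)
            let token := (st.1 ++ [word]).tail
            let token_to_stats := PySem.Str.join " " token
            (token, st.2.insert token_to_stats (st.2.getD token_to_stats 0 + 1)))
        ([], stats)).2)
    PySem.Dict.empty).items

-- ===== PORT B =====
def f_tokenizer_alt (d_phrases : List (String × Int)) (token_lenght : Int) : List (String × Int) :=
  ((PySem.List.dedup (d_phrases.map (·.1))).foldl
    (fun stats phrase =>
      let words := (PySem.Str.split? phrase " ").getD []  -- sep " " ≠ "": split? is always some here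
      (PySem.List.pyRange 1 ((words.length : Int) - token_lenght + 1) 1).foldl
        (fun stats i =>
          let key := PySem.Str.join " " (PySem.List.slice words (some i) (some (i + token_lenght)))
          stats.insert key (stats.getD key 0 + 1))
        stats)
    PySem.Dict.empty).items

-- ===== PRECONDITION & SPEC =====
-- Pre_ excludes negative token_lenght (outside the function's natural domain): there A's rolling
-- list stays empty and it counts the empty key once per word — a degenerate accident of the
-- implementation that neither behaviour specifies; B's natural range loop differs there.
def Pre_f_tokenizer (d_phrases : List (String × Int)) (token_lenght : Int) : Prop :=
  0 ≤ token_lenght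
instance (d_phrases : List (String × Int)) (token_lenght : Int) : Decidable (Pre_f_tokenizer d_phrases token_lenght) := by unfold Pre_f_tokenizer; infer_instance

def pvWitness_f_tokenizer : (List (String × Int)) × Int := ([("a b c", 1)], 2)

def Spec_f_tokenizer (d_phrases : List (String × Int)) (token_lenght : Int) (out : List (String × Int)) : Prop := out = f_tokenizer_alt d_phrases token_lenght
instance (d_phrases : List (String × Int)) (token_lenght : Int) (out : List (String × Int)) : Decidable (Spec_f_tokenizer d_phrases token_lenght out) := by unfold Spec_f_tokenizer; infer_instance

-- ===== CLAIM (what is proved, stated in full; the proofs are below) =====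
def Claim_equal_f_tokenizer : Prop := ∀ (d_phrases : List (String × Int)) (token_lenght : Int), Dom_f_tokenizer d_phrases token_lenght → Pre_f_tokenizer d_phrases token_lenght → Spec_f_tokenizer d_phrases token_lenght (f_tokenizer d_phrases token_lenght)

-- ===== LEMMAS AND PROOFS =====

/-- Increment a key's count (the `stats[k] = stats.get(k, 0) + 1` idiom both programs use). -/
def pvIncr (stats : PySem.Dict String Int) (key : String) : PySem.Dict String Int :=
  stats.insert key (stats.getD key 0 + 1)

/-- The sequence of keys A's inner loop counts, from a current rolling token list. -/
def pvKeysA (T : Nat) : List String → List String → List String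
  | _, [] => []
  | tok, w :: ws =>
    if tok.length < T then pvKeysA T (tok ++ [w]) ws
    else PySem.Str.join " " (tok ++ [w]).tail :: pvKeysA T ((tok ++ [w]).tail) ws

/-- The windows of a word list starting at index 1 (the keys B counts). -/
def pvWkeys (T : Nat) (l : List String) : List String :=
  (List.range (l.length - T)).map (fun k => PySem.Str.join " " ((l.drop (k + 1)).take T))

theorem pvA_fold (t : Int) (ht : 0 ≤ t) (ws : List String) :
    ∀ (tok : List String) (stats : PySem.Dict String Int),
    (List.foldl
      (fun (st : List String × PySem.Dict String Int) word =>
        if (st.1.length : Int) < t then (st.1 ++ [word], st.2)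
        else ((st.1 ++ [word]).tail,
              st.2.insert (PySem.Str.join " " (st.1 ++ [word]).tail)
                (st.2.getD (PySem.Str.join " " (st.1 ++ [word]).tail) 0 + 1)))
      (tok, stats) ws).2
    = List.foldl pvIncr stats (pvKeysA t.toNat tok ws) := by
  induction ws with
  | nil => intro tok stats; simp [pvKeysA]
  | cons w ws ih =>
    intro tok stats
    by_cases h : tok.length < t.toNat
    · have h' : (tok.length : Int) < t := by omega
      simp only [List.foldl_cons, pvKeysA, if_pos h, if_pos h']
      exact ih _ _
    · have h' : ¬ (tok.length : Int) < t := by omega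
      simp only [List.foldl_cons, pvKeysA, if_neg h, if_neg h']
      simpa [pvIncr] using ih ((tok ++ [w]).tail) _

theorem pvTail_append (tok : List String) (w : String) (ws : List String) :
    (tok ++ [w]).tail ++ ws = (tok ++ w :: ws).tail := by
  cases tok <;> simp

theorem pvKeysA_spec (T : Nat) (ws : List String) :
    ∀ (tok : List String), tok.length ≤ T → pvKeysA T tok ws = pvWkeys T (tok ++ ws) := by
  induction ws with
  | nil =>
    intro tok hlen
    simp only [pvKeysA, pvWkeys, List.append_nil]
    have : tok.length - T = 0 := by omega
    simp [this]
  | cons w ws ih =>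
    intro tok hlen
    by_cases h : tok.length < T
    · rw [pvKeysA, if_pos h, ih (tok ++ [w]) (by simp; omega)]
      simp [pvWkeys]
    · have hT : tok.length = T := by omega
      rw [pvKeysA, if_neg h]
      have htok' : ((tok ++ [w]).tail).length = T := by
        simp [List.length_tail, hT]
      rw [ih ((tok ++ [w]).tail) (le_of_eq htok')]
      have hlenl : (tok ++ w :: ws).length - T = ws.length + 1 := by simp [hT]
      have hdrop1 : List.drop 1 (tok ++ w :: ws) = (tok ++ [w]).tail ++ ws := by
        rw [List.drop_one]; exact (pvTail_append tok w ws).symm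
      simp only [pvWkeys, hlenl, List.range_succ_eq_map, List.map_cons, List.map_map]
      congr 1
      · -- head: the window at index 1
        rw [show (0 : Nat) + 1 = 1 from rfl, hdrop1, List.take_left' htok']
      · -- tail: windows shift by one
        have hlen' : ((tok ++ [w]).tail ++ ws).length - T = ws.length := by
          simp [List.length_append, htok']
        rw [hlen']
        apply List.map_congr_left
        intro k _
        simp only [Function.comp]
        congr 2
        rw [← hdrop1, List.drop_drop]
        congr 1
        omega

theorem pvB_fold (t : Int) (ht : 0 ≤ t) (words : List String) (stats : PySem.Dict String Int) :
    (PySem.List.pyRange 1 ((words.length : Int) - t + 1) 1).foldl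
      (fun stats i =>
        stats.insert (PySem.Str.join " " (PySem.List.slice words (some i) (some (i + t))))
          (stats.getD (PySem.Str.join " " (PySem.List.slice words (some i) (some (i + t)))) 0 + 1))
      stats
    = List.foldl pvIncr stats (pvWkeys t.toNat words) := by
  obtain ⟨T, rfl⟩ : ∃ T : Nat, (T : Int) = t := ⟨t.toNat, Int.toNat_of_nonneg ht⟩
  rw [PySem.List.pyRange_one]
  have hn : ((words.length : Int) - (T : Int) + 1 - 1).toNat = words.length - T := by omega
  rw [hn, List.foldl_map]
  simp only [pvWkeys, List.foldl_map, Int.toNat_natCast]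
  apply PySem.List.foldl_congr_mem
  intro acc k _
  have h1 : (1 : Int) + (k : Int) = ((k + 1 : Nat) : Int) := by push_cast; ring
  rw [h1, PySem.List.slice_natCast_add]
  simp [pvIncr]

theorem pvInner_eq (t : Int) (ht : 0 ≤ t) (words : List String) (stats : PySem.Dict String Int) :
    (words.foldl
      (fun (st : List String × PySem.Dict String Int) word =>
        if (st.1.length : Int) < t then (st.1 ++ [word], st.2)
        else ((st.1 ++ [word]).tail,
              st.2.insert (PySem.Str.join " " (st.1 ++ [word]).tail)
                (st.2.getD (PySem.Str.join " " (st.1 ++ [word]).tail) 0 + 1)))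
      ([], stats)).2
    = (PySem.List.pyRange 1 ((words.length : Int) - t + 1) 1).foldl
        (fun stats i =>
          stats.insert (PySem.Str.join " " (PySem.List.slice words (some i) (some (i + t))))
            (stats.getD (PySem.Str.join " " (PySem.List.slice words (some i) (some (i + t)))) 0 + 1))
        stats := by
  rw [pvA_fold t ht _ [] stats, pvKeysA_spec t.toNat _ [] (by simp), pvB_fold t ht]
  rfl

-- ===== VERDICT (by name: the statement is the Claim_ definition above) =====
theorem f_tokenizer_spec : Claim_equal_f_tokenizer := by
  intro d_phrases token_lenght _ hpre
  unfold Spec_f_tokenizer f_tokenizer f_tokenizer_alt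
  congr 1
  apply PySem.List.foldl_congr_mem
  intro stats phrase _
  exact pvInner_eq token_lenght hpre ((PySem.Str.split? phrase " ").getD []) stats
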